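-- pv_equiv track=rewrite | github.com/AsterisCrack/Juego-AgenteLogico | V1.py | sensaciones_simplificar
-- ===== SOURCE A (Python) =====
-- def sensaciones_simplificar(sensaciones):
--     s = [None, None, None]
--     for i in range(len(sensaciones)):
--         if sensaciones[i] == "Sientes una leve brisa":
--             s[0] = 1
--         if sensaciones[i] == "Sientes un cosquilleo en la nuca":
--             s[1] = 1
--         if sensaciones[i] == "Hay una luz muy tenue":
--             s[2] = 1
--         elif sensaciones[i] == "Hay algo de luz":
--             s[2] = 2
--         elif sensaciones[i] == "Hay mucha luz":
--             s[2] = 3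
--     return s
-- ===== SOURCE B (Python) =====
-- LIGHT = {"Hay una luz muy tenue": 1, "Hay algo de luz": 2, "Hay mucha luz": 3}
--
-- def sensaciones_simplificar(sensaciones):
--     s0 = 1 if "Sientes una leve brisa" in sensaciones else None
--     s1 = 1 if "Sientes un cosquilleo en la nuca" in sensaciones else None
--     s2 = None
--     for x in reversed(sensaciones):
--         if x in LIGHT:
--             s2 = LIGHT[x]
--             break
--     return [s0, s1, s2]
-- ===== Notes on version B (the rewrite author's own statement) =====
-- stated objective: idiomatic
-- what changed: Replaces the index loop mutating a 3-slot state with two membership tests for the breeze/tingle flags and a reversed scan that breaks at the first (i.e. last forward) light sensation via a lookup table.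
import Mathlib
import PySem

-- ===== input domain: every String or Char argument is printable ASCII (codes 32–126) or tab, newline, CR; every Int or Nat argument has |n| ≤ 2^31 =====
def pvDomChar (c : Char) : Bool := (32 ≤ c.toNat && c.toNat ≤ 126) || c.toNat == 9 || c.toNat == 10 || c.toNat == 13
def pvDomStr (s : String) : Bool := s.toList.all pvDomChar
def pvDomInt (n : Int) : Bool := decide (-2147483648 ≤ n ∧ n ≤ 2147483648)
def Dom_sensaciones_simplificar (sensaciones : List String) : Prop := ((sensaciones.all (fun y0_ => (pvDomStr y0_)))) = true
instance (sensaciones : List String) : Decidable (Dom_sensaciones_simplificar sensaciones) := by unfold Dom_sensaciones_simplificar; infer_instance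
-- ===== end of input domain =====

-- B replaces A's index loop over a mutable 3-slot state with two membership tests and a
-- reversed scan through a lookup table for the last light sensation (idiomatic; same cost).

-- ===== PORT A =====
-- A's loop body: update the state (s0, s1, s2) from element x
def pvStepA (acc : Option Int × Option Int × Option Int) (x : String) :
    Option Int × Option Int × Option Int :=
  let acc := if x = "Sientes una leve brisa" then (some 1, acc.2.1, acc.2.2) else acc
  let acc := if x = "Sientes un cosquilleo en la nuca" then (acc.1, some 1, acc.2.2) else acc
  if x = "Hay una luz muy tenue" then (acc.1, acc.2.1, some 1)
  else if x = "Hay algo de luz" then (acc.1, acc.2.1, some 2)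
  else if x = "Hay mucha luz" then (acc.1, acc.2.1, some 3)
  else acc

def sensaciones_simplificar (sensaciones : List String) : List (Option Int) :=
  -- for i in range(len(sensaciones)): reads sensaciones[i] in order = fold over the list
  let s := sensaciones.foldl pvStepA (none, none, none)
  [s.1, s.2.1, s.2.2]

-- ===== PORT B =====
def pvLIGHT : PySem.Dict String Int :=
  (((PySem.Dict.empty).insert "Hay una luz muy tenue" 1).insert "Hay algo de luz" 2).insert "Hay mucha luz" 3

-- the reversed loop with break: first element of the reversed list found in pvLIGHT
def pvLastLight (xs : List String) : Option Int :=
  match xs with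
  | [] => none
  | x :: rest => match pvLIGHT.get? x with
    | some v => some v
    | none => pvLastLight rest

def sensaciones_simplificar_alt (sensaciones : List String) : List (Option Int) :=
  let s0 : Option Int := if "Sientes una leve brisa" ∈ sensaciones then some 1 else none
  let s1 : Option Int := if "Sientes un cosquilleo en la nuca" ∈ sensaciones then some 1 else none
  let s2 : Option Int := pvLastLight sensaciones.reverse
  [s0, s1, s2]

-- ===== PRECONDITION & SPEC =====
def Spec_sensaciones_simplificar (sensaciones : List String) (out : List (Option Int)) : Prop := out = sensaciones_simplificar_alt sensaciones
instance (sensaciones : List String) (out : List (Option Int)) : Decidable (Spec_sensaciones_simplificar sensaciones out) := by unfold Spec_sensaciones_simplificar; infer_instance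

-- ===== CLAIM (what is proved, stated in full; the proofs are below) =====
def Claim_equal_sensaciones_simplificar : Prop := ∀ (sensaciones : List String), Dom_sensaciones_simplificar sensaciones → Spec_sensaciones_simplificar sensaciones (sensaciones_simplificar sensaciones)

-- ===== LEMMAS AND PROOFS =====

theorem pvGetLIGHT (x : String) :
    pvLIGHT.get? x =
      (if x = "Hay una luz muy tenue" then some 1
       else if x = "Hay algo de luz" then some 2
       else if x = "Hay mucha luz" then some 3 else none) := by
  have hit : pvLIGHT =
      ⟨[("Hay una luz muy tenue", 1), ("Hay algo de luz", 2), ("Hay mucha luz", 3)]⟩ := by rfl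
  rw [hit]
  simp only [PySem.Dict.get?, List.find?]
  by_cases h1 : x = "Hay una luz muy tenue"
  · subst h1; decide
  by_cases h2 : x = "Hay algo de luz"
  · subst h2; decide
  by_cases h3 : x = "Hay mucha luz"
  · subst h3; decide
  have b1 : ("Hay una luz muy tenue" == x) = false := by
    simp only [beq_eq_false_iff_ne]; exact fun h => h1 h.symm
  have b2 : ("Hay algo de luz" == x) = false := by
    simp only [beq_eq_false_iff_ne]; exact fun h => h2 h.symm
  have b3 : ("Hay mucha luz" == x) = false := by
    simp only [beq_eq_false_iff_ne]; exact fun h => h3 h.symm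
  simp [h1, h2, h3, b1, b2, b3]

theorem pvLastLight_singleton (x : String) : pvLastLight [x] = pvLIGHT.get? x := by
  cases h : pvLIGHT.get? x <;> simp [pvLastLight, h]

theorem pvLastLight_append (l : List String) (x : String) :
    pvLastLight (l ++ [x]) =
      match pvLastLight l with
      | some v => some v
      | none => pvLastLight [x] := by
  induction l with
  | nil => cases h : pvLastLight [x] <;> simp [pvLastLight, h]
  | cons y t ih =>
    simp only [List.cons_append, pvLastLight]
    cases pvLIGHT.get? y with
    | some v => rfl
    | none => exact ih

set_option maxHeartbeats 2000000 in
theorem pvFold_char (xs : List String) (a b c : Option Int) :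
    xs.foldl pvStepA (a, b, c) =
      ((if "Sientes una leve brisa" ∈ xs then some 1 else a),
       (if "Sientes un cosquilleo en la nuca" ∈ xs then some 1 else b),
       (match pvLastLight xs.reverse with | some v => some v | none => c)) := by
  induction xs generalizing a b c with
  | nil => simp [pvLastLight]
  | cons x rest ih =>
    rw [List.foldl_cons, ih]
    have hrev : (x :: rest).reverse = rest.reverse ++ [x] := by simp
    rw [hrev, pvLastLight_append, pvLastLight_singleton, pvGetLIGHT]
    simp only [List.mem_cons, pvStepA]
    by_cases h1 : x = "Sientes una leve brisa" <;>
      by_cases h2 : x = "Sientes un cosquilleo en la nuca" <;>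
        by_cases h3 : x = "Hay una luz muy tenue" <;>
          by_cases h4 : x = "Hay algo de luz" <;>
            by_cases h5 : x = "Hay mucha luz" <;>
              (cases hL : pvLastLight rest.reverse <;> simp_all [eq_comm])

-- ===== VERDICT (by name: the statement is the Claim_ definition above) =====
theorem sensaciones_simplificar_spec : Claim_equal_sensaciones_simplificar := by
  intro xs _
  unfold Spec_sensaciones_simplificar sensaciones_simplificar sensaciones_simplificar_alt
  rw [pvFold_char]
  cases h : pvLastLight xs.reverse <;> simp
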